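-- pv_equiv track=rewrite | github.com/pypi-data/pypi-mirror-395 | packages/wof-explorer/wof_explorer-0.5.0a2-py3-none-any.whl/wof_explorer/discovery/explorer.py | _get_hierarchical_summary
-- ===== SOURCE A (Python) =====
-- from typing import Dict, Any, List, Optional, TYPE_CHECKING
--
-- def _get_hierarchical_summary(
--     placetype_counts: Dict[str, int]
-- ) -> Dict[str, int]:
--     """
--     Get summary of hierarchical coverage.
--
--     Args:
--         placetype_counts: Dictionary of placetype counts
--
--     Returns:
--         Dictionary with counts at each hierarchical level
--     """
--     hierarchy = {
--         "countries": 0,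
--         "regions": 0,
--         "counties": 0,
--         "localities": 0,
--         "neighborhoods": 0,
--     }
--
--     for placetype, count in placetype_counts.items():
--         if placetype == "country":
--             hierarchy["countries"] += count
--         elif placetype in ["region", "state", "province"]:
--             hierarchy["regions"] += count
--         elif placetype == "county":
--             hierarchy["counties"] += count
--         elif placetype in ["locality", "localadmin"]:
--             hierarchy["localities"] += count
--         elif placetype in ["neighbourhood", "neighborhood"]:
--             hierarchy["neighborhoods"] += count
--
--     return hierarchy
-- ===== SOURCE B (Python) =====
-- def _get_hierarchical_summary(placetype_counts):
--     def total(names):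
--         return sum(count for pt, count in placetype_counts.items() if pt in names)
--     return {
--         "countries": total(("country",)),
--         "regions": total(("region", "state", "province")),
--         "counties": total(("county",)),
--         "localities": total(("locality", "localadmin")),
--         "neighborhoods": total(("neighbourhood", "neighborhood")),
--     }
-- ===== Notes on version B (the rewrite author's own statement) =====
-- stated objective: alternative
-- what changed: Instead of one pass mutating a five-key accumulator dict via an if/elif dispatch, B builds the result dict directly from five independent filtered sums, one per hierarchy bucket.
import Mathlib
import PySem

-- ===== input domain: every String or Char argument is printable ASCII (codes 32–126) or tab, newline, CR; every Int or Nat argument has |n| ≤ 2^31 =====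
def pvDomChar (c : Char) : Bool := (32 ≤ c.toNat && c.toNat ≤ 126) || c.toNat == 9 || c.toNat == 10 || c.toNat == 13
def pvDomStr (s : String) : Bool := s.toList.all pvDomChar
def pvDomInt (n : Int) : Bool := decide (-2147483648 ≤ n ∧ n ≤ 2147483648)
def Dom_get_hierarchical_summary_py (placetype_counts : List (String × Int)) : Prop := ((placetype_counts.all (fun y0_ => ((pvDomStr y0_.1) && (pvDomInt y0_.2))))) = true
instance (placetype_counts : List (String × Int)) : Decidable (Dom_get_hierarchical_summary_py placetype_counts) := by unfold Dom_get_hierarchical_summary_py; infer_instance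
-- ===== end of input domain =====

-- B builds the result dict directly from five independent filtered sums (one per bucket) instead of A's single pass mutating an accumulator dict through an if/elif chain.

-- ===== PORT A =====
-- the fixed initial hierarchy dict
def pvHier0 : PySem.Dict String Int :=
  PySem.Dict.ofList [("countries", 0), ("regions", 0), ("counties", 0), ("localities", 0), ("neighborhoods", 0)]

-- loop body of A: the if/elif chain ('hierarchy[k] += count' = modify with default 0; k is always present)
def pvStepA (h : PySem.Dict String Int) (pc : String × Int) : PySem.Dict String Int :=
  if pc.1 == "country" then h.modify "countries" 0 (· + pc.2)
  else if pc.1 == "region" || pc.1 == "state" || pc.1 == "province" then h.modify "regions" 0 (· + pc.2)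
  else if pc.1 == "county" then h.modify "counties" 0 (· + pc.2)
  else if pc.1 == "locality" || pc.1 == "localadmin" then h.modify "localities" 0 (· + pc.2)
  else if pc.1 == "neighbourhood" || pc.1 == "neighborhood" then h.modify "neighborhoods" 0 (· + pc.2)
  else h

def get_hierarchical_summary_py (placetype_counts : List (String × Int)) : List (String × Int) :=
  (placetype_counts.foldl pvStepA pvHier0).items

-- ===== PORT B =====
-- B's helper 'total(names)': sum of the counts of the entries whose placetype is in names
def pvTotal (names : List String) (placetype_counts : List (String × Int)) : Int :=
  ((placetype_counts.filter (fun pc => names.contains pc.1)).map (·.2)).sum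

def get_hierarchical_summary_py_alt (placetype_counts : List (String × Int)) : List (String × Int) :=
  (PySem.Dict.ofList
    [("countries", pvTotal ["country"] placetype_counts),
     ("regions", pvTotal ["region", "state", "province"] placetype_counts),
     ("counties", pvTotal ["county"] placetype_counts),
     ("localities", pvTotal ["locality", "localadmin"] placetype_counts),
     ("neighborhoods", pvTotal ["neighbourhood", "neighborhood"] placetype_counts)]).items

-- ===== PRECONDITION & SPEC =====
def Spec_get_hierarchical_summary_py (placetype_counts : List (String × Int)) (out : List (String × Int)) : Prop := out = get_hierarchical_summary_py_alt placetype_counts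
instance (placetype_counts : List (String × Int)) (out : List (String × Int)) : Decidable (Spec_get_hierarchical_summary_py placetype_counts out) := by unfold Spec_get_hierarchical_summary_py; infer_instance

-- ===== CLAIM (what is proved, stated in full; the proofs are below) =====
def Claim_equal_get_hierarchical_summary_py : Prop := ∀ (placetype_counts : List (String × Int)), Dom_get_hierarchical_summary_py placetype_counts → Spec_get_hierarchical_summary_py placetype_counts (get_hierarchical_summary_py placetype_counts)

-- ===== LEMMAS AND PROOFS =====

-- unfolding pvTotal over a cons cell
theorem pvTotal_cons (names : List String) (x : String × Int) (rest : List (String × Int)) :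
    pvTotal names (x :: rest) = (if names.contains x.1 then x.2 else 0) + pvTotal names rest := by
  simp only [pvTotal, List.filter_cons]
  split <;> simp

-- invariant of A's loop: folding pvStepA over any literal five-key state adds each bucket's filtered sum
theorem foldA_inv (pcs : List (String × Int)) (a b c d e : Int) :
    pcs.foldl pvStepA (PySem.Dict.mk
      [("countries", a), ("regions", b), ("counties", c), ("localities", d), ("neighborhoods", e)])
    = PySem.Dict.mk
      [("countries", a + pvTotal ["country"] pcs),
       ("regions", b + pvTotal ["region", "state", "province"] pcs),
       ("counties", c + pvTotal ["county"] pcs),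
       ("localities", d + pvTotal ["locality", "localadmin"] pcs),
       ("neighborhoods", e + pvTotal ["neighbourhood", "neighborhood"] pcs)] := by
  induction pcs generalizing a b c d e with
  | nil => simp [pvTotal]
  | cons x rest ih =>
    obtain ⟨pt, cnt⟩ := x
    simp only [List.foldl_cons, pvTotal_cons]
    by_cases h1 : pt = "country"
    · subst h1
      have st : pvStepA (PySem.Dict.mk
          [("countries", a), ("regions", b), ("counties", c), ("localities", d), ("neighborhoods", e)])
          ("country", cnt) = PySem.Dict.mk
          [("countries", a + cnt), ("regions", b), ("counties", c), ("localities", d), ("neighborhoods", e)] := rfl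
      rw [st, ih]; simp [add_assoc]
    by_cases h2 : pt = "region"
    · subst h2
      have st : pvStepA (PySem.Dict.mk
          [("countries", a), ("regions", b), ("counties", c), ("localities", d), ("neighborhoods", e)])
          ("region", cnt) = PySem.Dict.mk
          [("countries", a), ("regions", b + cnt), ("counties", c), ("localities", d), ("neighborhoods", e)] := rfl
      rw [st, ih]; simp [add_assoc]
    by_cases h3 : pt = "state"
    · subst h3
      have st : pvStepA (PySem.Dict.mk
          [("countries", a), ("regions", b), ("counties", c), ("localities", d), ("neighborhoods", e)])
          ("state", cnt) = PySem.Dict.mk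
          [("countries", a), ("regions", b + cnt), ("counties", c), ("localities", d), ("neighborhoods", e)] := rfl
      rw [st, ih]; simp [add_assoc]
    by_cases h4 : pt = "province"
    · subst h4
      have st : pvStepA (PySem.Dict.mk
          [("countries", a), ("regions", b), ("counties", c), ("localities", d), ("neighborhoods", e)])
          ("province", cnt) = PySem.Dict.mk
          [("countries", a), ("regions", b + cnt), ("counties", c), ("localities", d), ("neighborhoods", e)] := rfl
      rw [st, ih]; simp [add_assoc]
    by_cases h5 : pt = "county"
    · subst h5
      have st : pvStepA (PySem.Dict.mk
          [("countries", a), ("regions", b), ("counties", c), ("localities", d), ("neighborhoods", e)])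
          ("county", cnt) = PySem.Dict.mk
          [("countries", a), ("regions", b), ("counties", c + cnt), ("localities", d), ("neighborhoods", e)] := rfl
      rw [st, ih]; simp [add_assoc]
    by_cases h6 : pt = "locality"
    · subst h6
      have st : pvStepA (PySem.Dict.mk
          [("countries", a), ("regions", b), ("counties", c), ("localities", d), ("neighborhoods", e)])
          ("locality", cnt) = PySem.Dict.mk
          [("countries", a), ("regions", b), ("counties", c), ("localities", d + cnt), ("neighborhoods", e)] := rfl
      rw [st, ih]; simp [add_assoc]
    by_cases h7 : pt = "localadmin"
    · subst h7
      have st : pvStepA (PySem.Dict.mk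
          [("countries", a), ("regions", b), ("counties", c), ("localities", d), ("neighborhoods", e)])
          ("localadmin", cnt) = PySem.Dict.mk
          [("countries", a), ("regions", b), ("counties", c), ("localities", d + cnt), ("neighborhoods", e)] := rfl
      rw [st, ih]; simp [add_assoc]
    by_cases h8 : pt = "neighbourhood"
    · subst h8
      have st : pvStepA (PySem.Dict.mk
          [("countries", a), ("regions", b), ("counties", c), ("localities", d), ("neighborhoods", e)])
          ("neighbourhood", cnt) = PySem.Dict.mk
          [("countries", a), ("regions", b), ("counties", c), ("localities", d), ("neighborhoods", e + cnt)] := rfl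
      rw [st, ih]; simp [add_assoc]
    by_cases h9 : pt = "neighborhood"
    · subst h9
      have st : pvStepA (PySem.Dict.mk
          [("countries", a), ("regions", b), ("counties", c), ("localities", d), ("neighborhoods", e)])
          ("neighborhood", cnt) = PySem.Dict.mk
          [("countries", a), ("regions", b), ("counties", c), ("localities", d), ("neighborhoods", e + cnt)] := rfl
      rw [st, ih]; simp [add_assoc]
    have st : pvStepA (PySem.Dict.mk
        [("countries", a), ("regions", b), ("counties", c), ("localities", d), ("neighborhoods", e)])
        (pt, cnt) = PySem.Dict.mk
        [("countries", a), ("regions", b), ("counties", c), ("localities", d), ("neighborhoods", e)] := by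
      simp [pvStepA, h1, h2, h3, h4, h5, h6, h7, h8, h9]
    rw [st, ih]
    simp [h1, h2, h3, h4, h5, h6, h7, h8, h9]

theorem get_hierarchical_summary_py_spec : Claim_equal_get_hierarchical_summary_py := by
  intro pcs _
  show _ = _
  unfold get_hierarchical_summary_py get_hierarchical_summary_py_alt pvHier0
  have h0 : PySem.Dict.ofList [("countries", (0:Int)), ("regions", 0), ("counties", 0), ("localities", 0), ("neighborhoods", 0)] = PySem.Dict.mk [("countries", 0), ("regions", 0), ("counties", 0), ("localities", 0), ("neighborhoods", 0)] := rfl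
  rw [h0, foldA_inv]
  simp
  rfl
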